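-- pv_equiv track=rewrite | github.com/schuang/llmkb | src/llmkb/sync_zotero.py | trim_plan
-- ===== SOURCE A (Python) =====
-- def trim_plan(plan: dict[str, list[str]], limit: int | None) -> dict[str, list[str]]:
--     if limit is None or limit < 0:
--         return plan
--     if limit == 0:
--         return {"create": [], "update": [], "delete": []}
--
--     ordered = [("create", key) for key in plan["create"]]
--     ordered += [("update", key) for key in plan["update"]]
--     ordered += [("delete", key) for key in plan["delete"]]
--     kept = ordered[:limit]
--
--     trimmed = {"create": [], "update": [], "delete": []}
--     for action, key in kept:
--         trimmed[action].append(key)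
--     return trimmed
-- ===== SOURCE B (Python) =====
-- def trim_plan(plan: dict[str, list[str]], limit: int | None) -> dict[str, list[str]]:
--     if limit is None or limit < 0:
--         return plan
--     if limit == 0:
--         return {"create": [], "update": [], "delete": []}
--     c = plan["create"][:limit]
--     rem = limit - len(c)
--     u = plan["update"][:rem] if rem > 0 else []
--     rem -= len(u)
--     d = plan["delete"][:rem] if rem > 0 else []
--     return {"create": c, "update": u, "delete": d}
-- ===== Notes on version B (the rewrite author's own statement) =====
-- stated objective: simpler
-- what changed: Replaces the tagged-tuple flattening of all three lists, a global slice, and a redistribution loop over a fresh dict with three direct prefix slices under a shrinking budget.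
import Mathlib
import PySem

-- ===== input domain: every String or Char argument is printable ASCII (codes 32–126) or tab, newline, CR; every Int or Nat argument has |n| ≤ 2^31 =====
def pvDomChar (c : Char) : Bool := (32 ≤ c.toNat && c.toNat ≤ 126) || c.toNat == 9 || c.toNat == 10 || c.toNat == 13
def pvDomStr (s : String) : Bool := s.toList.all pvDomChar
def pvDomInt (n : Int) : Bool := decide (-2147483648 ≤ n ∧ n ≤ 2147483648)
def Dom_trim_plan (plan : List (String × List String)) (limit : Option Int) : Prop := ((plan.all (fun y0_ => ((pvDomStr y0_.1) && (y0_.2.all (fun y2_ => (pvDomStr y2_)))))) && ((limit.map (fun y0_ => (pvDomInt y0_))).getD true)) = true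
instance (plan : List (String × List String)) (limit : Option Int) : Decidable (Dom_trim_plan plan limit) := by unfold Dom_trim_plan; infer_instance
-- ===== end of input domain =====

-- B replaces A's tagged-tuple flatten + slice + redistribution loop with three
-- direct prefix slices under a shrinking budget (objective: simpler).


-- ===== PORT A =====
-- plan["k"]: first-match lookup in the association list; the '.getD []' is only
-- reached when Pre_ guarantees the key is present (a missing key is Python's
-- KeyError, excluded by Pre_).
def pvKey (plan : List (String × List String)) (k : String) : List String :=
  (plan.lookup k).getD []

def trim_plan (plan : List (String × List String)) (limit : Option Int) : List (String × List String) :=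
  match limit with
  | none => plan
  | some l =>
    if l < 0 then plan
    else if l = 0 then [("create", []), ("update", []), ("delete", [])]
    else
      let ordered := (pvKey plan "create").map (fun k => (("create" : String), k))
        ++ (pvKey plan "update").map (fun k => (("update" : String), k))
        ++ (pvKey plan "delete").map (fun k => (("delete" : String), k))
      let kept := PySem.List.slice ordered none (some l)
      let trimmed := kept.foldl
        (fun (d : PySem.Dict String (List String)) p => d.modify p.1 [] (· ++ [p.2]))
        (PySem.Dict.mk [("create", []), ("update", []), ("delete", [])])
      trimmed.items

-- ===== PORT B =====
def trim_plan_alt (plan : List (String × List String)) (limit : Option Int) : List (String × List String) :=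
  match limit with
  | none => plan
  | some l =>
    if l < 0 then plan
    else if l = 0 then [("create", []), ("update", []), ("delete", [])]
    else
      let c := PySem.List.slice (pvKey plan "create") none (some l)
      let rem := l - (c.length : Int)
      let u := if rem > 0 then PySem.List.slice (pvKey plan "update") none (some rem) else []
      let rem2 := rem - (u.length : Int)
      let d := if rem2 > 0 then PySem.List.slice (pvKey plan "delete") none (some rem2) else []
      [("create", c), ("update", u), ("delete", d)]

-- ===== PRECONDITION & SPEC =====
-- Pre_ excludes only the inputs on which A raises KeyError: a positive limit
-- with one of the keys "create"/"update"/"delete" absent from plan.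
def Pre_trim_plan (plan : List (String × List String)) (limit : Option Int) : Prop :=
  (limit.getD (-1) > 0) →
    ((plan.lookup "create").isSome ∧ (plan.lookup "update").isSome ∧ (plan.lookup "delete").isSome)
instance (plan : List (String × List String)) (limit : Option Int) : Decidable (Pre_trim_plan plan limit) := by unfold Pre_trim_plan; infer_instance

def pvWitness_trim_plan : (List (String × List String)) × Option Int :=
  ([("create", ["a", "b"]), ("update", ["c"]), ("delete", ["d"])], some 2)

def Spec_trim_plan (plan : List (String × List String)) (limit : Option Int) (out : List (String × List String)) : Prop := out = trim_plan_alt plan limit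
instance (plan : List (String × List String)) (limit : Option Int) (out : List (String × List String)) : Decidable (Spec_trim_plan plan limit out) := by unfold Spec_trim_plan; infer_instance

-- ===== CLAIM (what is proved, stated in full; the proofs are below) =====
def Claim_equal_trim_plan : Prop := ∀ (plan : List (String × List String)) (limit : Option Int), Dom_trim_plan plan limit → Pre_trim_plan plan limit → Spec_trim_plan plan limit (trim_plan plan limit)

-- ===== LEMMAS AND PROOFS =====

theorem fold_create (xs a b c : List String) :
    ((xs.map (fun k => (("create" : String), k))).foldl
      (fun (d : PySem.Dict String (List String)) p => d.modify p.1 [] (· ++ [p.2]))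
      (PySem.Dict.mk [("create", a), ("update", b), ("delete", c)]))
    = PySem.Dict.mk [("create", a ++ xs), ("update", b), ("delete", c)] := by
  induction xs generalizing a with
  | nil => simp
  | cons x xs ih =>
    simp only [List.map_cons, List.foldl_cons]
    have h : (PySem.Dict.mk [(("create" : String), a), ("update", b), ("delete", c)]).modify "create" [] (· ++ [x])
        = PySem.Dict.mk [("create", a ++ [x]), ("update", b), ("delete", c)] := by
      simp [PySem.Dict.modify, PySem.Dict.insert, PySem.Dict.contains, PySem.Dict.getD, PySem.Dict.get?]
    rw [h, ih]
    simp

theorem fold_update (xs a b c : List String) :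
    ((xs.map (fun k => (("update" : String), k))).foldl
      (fun (d : PySem.Dict String (List String)) p => d.modify p.1 [] (· ++ [p.2]))
      (PySem.Dict.mk [("create", a), ("update", b), ("delete", c)]))
    = PySem.Dict.mk [("create", a), ("update", b ++ xs), ("delete", c)] := by
  induction xs generalizing b with
  | nil => simp
  | cons x xs ih =>
    simp only [List.map_cons, List.foldl_cons]
    have h : (PySem.Dict.mk [(("create" : String), a), ("update", b), ("delete", c)]).modify "update" [] (· ++ [x])
        = PySem.Dict.mk [("create", a), ("update", b ++ [x]), ("delete", c)] := by
      simp [PySem.Dict.modify, PySem.Dict.insert, PySem.Dict.contains, PySem.Dict.getD, PySem.Dict.get?]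
    rw [h, ih]
    simp

theorem fold_delete (xs a b c : List String) :
    ((xs.map (fun k => (("delete" : String), k))).foldl
      (fun (d : PySem.Dict String (List String)) p => d.modify p.1 [] (· ++ [p.2]))
      (PySem.Dict.mk [("create", a), ("update", b), ("delete", c)]))
    = PySem.Dict.mk [("create", a), ("update", b), ("delete", c ++ xs)] := by
  induction xs generalizing c with
  | nil => simp
  | cons x xs ih =>
    simp only [List.map_cons, List.foldl_cons]
    have h : (PySem.Dict.mk [(("create" : String), a), ("update", b), ("delete", c)]).modify "delete" [] (· ++ [x])
        = PySem.Dict.mk [("create", a), ("update", b), ("delete", c ++ [x])] := by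
      simp [PySem.Dict.modify, PySem.Dict.insert, PySem.Dict.contains, PySem.Dict.getD, PySem.Dict.get?]
    rw [h, ih]
    simp

-- A's value for a positive limit, as three takes.
theorem trim_plan_pos (plan : List (String × List String)) (l : Int) (hl : 0 < l) :
    trim_plan plan (some l)
    = [("create", (pvKey plan "create").take l.toNat),
       ("update", (pvKey plan "update").take (l.toNat - (pvKey plan "create").length)),
       ("delete", (pvKey plan "delete").take (l.toNat - (pvKey plan "create").length - (pvKey plan "update").length))] := by
  have h0 : ¬ l < 0 := by omega
  have h1 : l ≠ 0 := by omega
  simp only [trim_plan, h0, h1, if_false]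
  rw [PySem.List.slice_to _ (by omega)]
  rw [List.take_append, List.take_append]
  simp only [← List.map_take, List.length_append, List.length_map, List.foldl_append]
  rw [fold_create, fold_update, fold_delete]
  have e1 : l.toNat - ((pvKey plan "create").length + (pvKey plan "update").length)
      = l.toNat - (pvKey plan "create").length - (pvKey plan "update").length := by omega
  simp [e1]

theorem trim_plan_alt_pos (plan : List (String × List String)) (l : Int) (hl : 0 < l) :
    trim_plan_alt plan (some l)
    = [("create", (pvKey plan "create").take l.toNat),
       ("update", (pvKey plan "update").take (l.toNat - (pvKey plan "create").length)),
       ("delete", (pvKey plan "delete").take (l.toNat - (pvKey plan "create").length - (pvKey plan "update").length))] := by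
  have h0 : ¬ l < 0 := by omega
  have h1 : l ≠ 0 := by omega
  simp only [trim_plan_alt, h0, h1, if_false]
  rw [PySem.List.slice_to _ (by omega)]
  set cs := pvKey plan "create" with hcs
  set us := pvKey plan "update" with hus
  set ds := pvKey plan "delete" with hds
  have hclen : (cs.take l.toNat).length = min l.toNat cs.length := by simp
  by_cases hrem : l - ((cs.take l.toNat).length : Int) > 0
  · simp only [hrem, if_true]
    rw [PySem.List.slice_to _ (by omega)]
    have hr : (l - ((cs.take l.toNat).length : Int)).toNat = l.toNat - cs.length := by
      simp only [hclen]; omega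
    rw [hr]
    have hulen : (us.take (l.toNat - cs.length)).length = min (l.toNat - cs.length) us.length := by simp
    by_cases hrem2 : l - ((cs.take l.toNat).length : Int) - ((us.take (l.toNat - cs.length)).length : Int) > 0
    · simp only [hrem2, if_true]
      rw [PySem.List.slice_to _ (by omega)]
      have hr2 : (l - ((cs.take l.toNat).length : Int) - ((us.take (l.toNat - cs.length)).length : Int)).toNat
          = l.toNat - cs.length - us.length := by
        simp only [hclen, hulen]; omega
      rw [hr2]
    · simp only [hrem2, if_false]
      have : l.toNat - cs.length - us.length = 0 := by
        simp only [hclen, hulen] at hrem2 ⊢; omega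
      rw [this, List.take_zero]
  · simp only [hrem, if_false]
    have hz : l.toNat - cs.length = 0 := by
      simp only [hclen] at hrem; omega
    have hz2 : l.toNat - cs.length - us.length = 0 := by omega
    have hrem2 : ¬ (l - ((cs.take l.toNat).length : Int) - (([] : List String).length : Int) > 0) := by
      simp only [List.length_nil, Int.ofNat_zero]; omega
    simp only [hrem2, if_false, hz, Nat.zero_sub, List.take_zero]

-- ===== VERDICT (by name: the statement is the Claim_ definition above) =====
theorem trim_plan_spec : Claim_equal_trim_plan := by
  intro plan limit _hdom _hpre
  unfold Spec_trim_plan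
  match limit with
  | none => rfl
  | some l =>
    by_cases hneg : l < 0
    · simp [trim_plan, trim_plan_alt, hneg]
    · by_cases hz : l = 0
      · simp [trim_plan, trim_plan_alt, hz]
      · rw [trim_plan_pos plan l (by omega), trim_plan_alt_pos plan l (by omega)]
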